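-- pv_equiv track=rewrite | github.com/EmmaMathieu/Comparateur_VCF | compare.py | pool
-- ===== SOURCE A (Python) =====
-- def pool(dico):
--     resultat = {}
--     for passage, value_passage in dico.items():
--         d = {}
--         l = []
--         for replicat, value_replicat in value_passage.items():
--             for position, variants in value_replicat.items():
--                 for variant in variants:
--                     l.append((position, variant))
--
--         l.sort()
--         for pos, var in l:
--             if passage in d:
--                 if pos in d[passage]:
--                     d[passage][pos].append(var)
--                 else:
--                     d[passage][pos] = [var]
--             else:
--                 d[passage] = {pos: [var]}
--         resultat[passage] = d
--     return resultat
-- ===== SOURCE B (Python) =====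
-- def pool(dico):
--     resultat = {}
--     for passage, value_passage in dico.items():
--         groups = {}
--         for value_replicat in value_passage.values():
--             for position, variants in value_replicat.items():
--                 for variant in variants:
--                     groups.setdefault(position, []).append(variant)
--         d = {}
--         if groups:
--             d[passage] = {pos: sorted(groups[pos]) for pos in sorted(groups)}
--         resultat[passage] = d
--     return resultat
-- ===== Notes on version B (the rewrite author's own statement) =====
-- stated objective: alternative
-- what changed: Instead of flattening every (position, variant) pair into one list, sorting it as tuples and regrouping it into the nested dict with membership checks, B groups variants by position in a single linear pass (dict of buckets via setdefault) and then sorts the position keys and each bucket separately.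
import Mathlib
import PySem

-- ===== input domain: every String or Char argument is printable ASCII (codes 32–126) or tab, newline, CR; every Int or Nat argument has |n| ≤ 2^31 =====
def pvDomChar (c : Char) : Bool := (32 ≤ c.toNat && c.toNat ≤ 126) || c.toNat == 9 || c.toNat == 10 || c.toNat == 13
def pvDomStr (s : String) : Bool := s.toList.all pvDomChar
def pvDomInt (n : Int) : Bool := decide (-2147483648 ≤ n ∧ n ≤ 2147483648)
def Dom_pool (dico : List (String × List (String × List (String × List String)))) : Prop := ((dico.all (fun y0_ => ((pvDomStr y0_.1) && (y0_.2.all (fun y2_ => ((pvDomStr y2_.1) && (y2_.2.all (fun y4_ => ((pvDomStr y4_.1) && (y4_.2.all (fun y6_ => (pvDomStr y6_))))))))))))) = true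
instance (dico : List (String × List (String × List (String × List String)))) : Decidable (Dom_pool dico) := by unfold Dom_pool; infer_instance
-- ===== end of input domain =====

-- B changes the decomposition: A flattens all (position, variant) pairs per passage, sorts them once as
-- tuples and regroups into the nested dict; B groups variants by position in one pass and sorts the
-- position keys and each bucket separately (objective: alternative, same asymptotic cost).

-- ===== PORT A =====
def poolEntryA (passage : String) (vp : List (String × List (String × List String))) :
    List (String × List (String × List String)) :=
  let l : List (String × String) :=
    vp.foldl (fun l rv =>
      rv.2.foldl (fun l pv =>
        pv.2.foldl (fun l variant => l ++ [(pv.1, variant)]) l) l) []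
  let ls := PySem.List.sorted2 l Prod.fst Prod.snd
  let d : PySem.Dict String (PySem.Dict String (List String)) :=
    ls.foldl (fun d q =>
      if d.contains passage then
        if (d.getD passage PySem.Dict.empty).contains q.1 then
          d.modify passage PySem.Dict.empty (fun inner => inner.modify q.1 [] (fun vs => vs ++ [q.2]))
        else
          d.modify passage PySem.Dict.empty (fun inner => inner.insert q.1 [q.2])
      else d.insert passage (PySem.Dict.empty.insert q.1 [q.2])) PySem.Dict.empty
  d.items.map (fun e => (e.1, e.2.items))

def pool (dico : List (String × List (String × List (String × List String)))) :
    List (String × List (String × List (String × List String))) :=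
  (dico.foldl (fun resultat pv => resultat.insert pv.1 (poolEntryA pv.1 pv.2))
    (PySem.Dict.empty : PySem.Dict String (List (String × List (String × List String))))).items

-- ===== PORT B =====
def poolEntryB (passage : String) (vp : List (String × List (String × List String))) :
    List (String × List (String × List String)) :=
  let groups : PySem.Dict String (List String) :=
    vp.foldl (fun g rv =>
      rv.2.foldl (fun g pv =>
        pv.2.foldl (fun g variant => g.modify pv.1 [] (fun vs => vs ++ [variant])) g) g)
      PySem.Dict.empty
  if groups.items = [] then []
  else [(passage, (PySem.List.sorted groups.keys (fun k => k) false).map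
          (fun pos => (pos, PySem.List.sorted (groups.getD pos []) (fun v => v) false)))]

def pool_alt (dico : List (String × List (String × List (String × List String)))) :
    List (String × List (String × List (String × List String))) :=
  (dico.foldl (fun resultat pv => resultat.insert pv.1 (poolEntryB pv.1 pv.2))
    (PySem.Dict.empty : PySem.Dict String (List (String × List (String × List String))))).items

-- ===== PRECONDITION & SPEC =====
def Spec_pool (dico : List (String × List (String × List (String × List String)))) (out : List (String × List (String × List (String × List String)))) : Prop := out = pool_alt dico
instance (dico : List (String × List (String × List (String × List String)))) (out : List (String × List (String × List (String × List String)))) : Decidable (Spec_pool dico out) := by unfold Spec_pool; infer_instance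

-- ===== CLAIM (what is proved, stated in full; the proofs are below) =====
def Claim_equal_pool : Prop := ∀ (dico : List (String × List (String × List (String × List String)))), Dom_pool dico → Spec_pool dico (pool dico)

-- ===== LEMMAS AND PROOFS =====

-- flat list of (position, variant) pairs of one passage, in A's append order
def flatP (vp : List (String × List (String × List String))) : List (String × String) :=
  vp.flatMap (fun rv => rv.2.flatMap (fun pv => pv.2.map (fun v => (pv.1, v))))

-- variants of position p, in encounter order
def bucket (p : String) (P : List (String × String)) : List String :=
  (P.filter (fun q => q.1 == p)).map Prod.snd

-- distinct positions, first-occurrence order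
def kset (P : List (String × String)) : List String := PySem.List.dedup (P.map Prod.fst)

-- the one-pass grouping fold (B's groups; A's inner dict is the same fold once simplified)
def groupFold (P : List (String × String)) : PySem.Dict String (List String) :=
  P.foldl (fun g q => g.modify q.1 [] (fun vs => vs ++ [q.2])) PySem.Dict.empty

-- lexicographic ≤ on string pairs (the order produced by Python's tuple sort)
def lexLe (a b : String × String) : Prop := a.1 < b.1 ∨ (a.1 = b.1 ∧ a.2 ≤ b.2)

theorem lexLe_trans {a b c : String × String} (h1 : lexLe a b) (h2 : lexLe b c) : lexLe a c := by
  rcases h1 with h1 | ⟨e1, h1⟩ <;> rcases h2 with h2 | ⟨e2, h2⟩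
  · exact Or.inl (lt_trans h1 h2)
  · exact Or.inl (e2 ▸ h1)
  · exact Or.inl (e1 ▸ h2)
  · exact Or.inr ⟨e1.trans e2, le_trans h1 h2⟩

theorem insertBy_lex_pairwise (x : String × String) (ys : List (String × String))
    (h : ys.Pairwise lexLe) :
    (PySem.List.insertBy (fun a b => decide (a.1 < b.1) || (!decide (b.1 < a.1) && decide (a.2 < b.2))) x ys).Pairwise lexLe := by
  induction ys with
  | nil => simp [PySem.List.insertBy]
  | cons y ys ih =>
    rw [PySem.List.insertBy]
    by_cases hb : (decide (x.1 < y.1) || (!decide (y.1 < x.1) && decide (x.2 < y.2))) = true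
    · simp only [hb]
      have hxy : lexLe x y := by
        simp only [Bool.or_eq_true, Bool.and_eq_true, Bool.not_eq_true', decide_eq_true_eq, decide_eq_false_iff_not] at hb
        rcases hb with h1 | ⟨h1, h2⟩
        · exact Or.inl h1
        · rcases lt_trichotomy x.1 y.1 with h3 | h3 | h3
          · exact Or.inl h3
          · exact Or.inr ⟨h3, le_of_lt h2⟩
          · exact absurd h3 h1
      exact List.Pairwise.cons (fun z hz => by
        rcases hz with _ | hz
        · exact hxy
        · exact lexLe_trans hxy ((List.pairwise_cons.mp h).1 _ (by assumption))) h
    · simp only [Bool.not_eq_true] at hb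
      simp only [hb]
      have hyx : lexLe y x := by
        simp only [Bool.or_eq_false_iff, Bool.and_eq_false_iff, Bool.not_eq_false', decide_eq_true_eq, decide_eq_false_iff_not] at hb
        obtain ⟨h1, h2⟩ := hb
        rcases h2 with h2 | h2
        · exact Or.inl h2
        · rcases lt_trichotomy y.1 x.1 with h3 | h3 | h3
          · exact Or.inl h3
          · exact Or.inr ⟨h3, le_of_not_gt h2⟩
          · exact absurd h3 h1
      refine List.Pairwise.cons (fun z hz => ?_) (ih (List.pairwise_cons.mp h).2)
      rcases (PySem.List.insertBy_mem_iff _ _ _ _).mp hz with rfl | hz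
      · exact hyx
      · exact (List.pairwise_cons.mp h).1 _ hz

theorem sorted2_lex_pairwise (xs : List (String × String)) :
    (PySem.List.sorted2 xs Prod.fst Prod.snd).Pairwise lexLe := by
  show (List.foldl (fun acc x => PySem.List.insertBy _ x acc) [] xs).Pairwise lexLe
  suffices h : ∀ acc : List (String × String), acc.Pairwise lexLe →
      (List.foldl (fun acc x => PySem.List.insertBy (fun a b => decide (a.1 < b.1) || (!decide (b.1 < a.1) && decide (a.2 < b.2))) x acc) acc xs).Pairwise lexLe by
    exact h [] (by simp)
  induction xs with
  | nil => intro acc hacc; simpa using hacc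
  | cons x xs ih =>
    intro acc hacc
    exact ih _ (insertBy_lex_pairwise x acc hacc)

theorem dedup_sublist {α : Type} [BEq α] [LawfulBEq α] (xs : List α) :
    (PySem.List.dedup xs).Sublist xs := by
  induction xs using List.reverseRecOn with
  | nil => simp [PySem.List.dedup, PySem.Set.ofList]
  | append_singleton xs x ih =>
    simp only [PySem.List.dedup_eq_ofList, PySem.Set.ofList_append_singleton] at *
    rw [PySem.Set.add_eq_ite]
    split
    · exact ih.trans (List.sublist_append_left xs [x])
    · exact ih.append (List.Sublist.refl [x])

theorem bucket_append_singleton (p : String) (P : List (String × String)) (q : String × String) :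
    bucket p (P ++ [q]) = bucket p P ++ (if q.1 == p then [q.2] else []) := by
  simp only [bucket, List.filter_append, List.map_append]
  congr 1
  by_cases h : q.1 == p <;> simp [List.filter, h]

theorem groupFold_items (P : List (String × String)) :
    (groupFold P).items = (kset P).map (fun p => (p, bucket p P)) := by
  induction P using List.reverseRecOn with
  | nil => simp [groupFold, kset, PySem.Dict.empty, PySem.List.dedup, PySem.Set.ofList]
  | append_singleton P q ih =>
    have hkeys : (groupFold P).keys = kset P := by
      simp [PySem.Dict.keys, ih, List.map_map, Function.comp_def]
    have hstep : groupFold (P ++ [q]) = (groupFold P).modify q.1 [] (fun vs => vs ++ [q.2]) := by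
      simp [groupFold, List.foldl_append]
    have hks : kset (P ++ [q]) = PySem.Set.add (kset P) q.1 := by
      simp [kset, PySem.List.dedup_eq_ofList, PySem.Set.ofList_append_singleton]
    by_cases hq : q.1 ∈ kset P
    · have hcont : (groupFold P).contains q.1 = true :=
        (PySem.Dict.contains_iff_mem_keys _ _).mpr (hkeys ▸ hq)
      have hget : (groupFold P).getD q.1 [] = bucket q.1 P := by
        have hmem : (q.1, bucket q.1 P) ∈ (groupFold P).items := by
          rw [ih]; exact List.mem_map_of_mem hq
        have := PySem.Dict.get?_of_mem_items _ hmem (hkeys ▸ PySem.List.nodup_dedup _)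
        simp [PySem.Dict.getD, this]
      rw [hstep, PySem.Dict.modify, hget, hks, PySem.Set.add_of_mem hq,
        PySem.Dict.items_insert, if_pos hcont, ih, List.map_map]
      refine List.map_congr_left fun p hp => ?_
      by_cases hpq : p = q.1
      · subst hpq
        simp [bucket_append_singleton]
      · simp [Function.comp, Ne.symm hpq, bucket_append_singleton,
          beq_iff_eq, fun h => hpq (h : p = q.1)]
    · have hcont : (groupFold P).contains q.1 = false := by
        by_contra hne
        have hc : (groupFold P).contains q.1 = true := by
          revert hne; cases (groupFold P).contains q.1 <;> simp
        exact hq (hkeys ▸ (PySem.Dict.contains_iff_mem_keys _ _).mp hc)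
      have hget : (groupFold P).getD q.1 [] = [] :=
        PySem.Dict.getD_of_not_contains _ _ hcont
      have hbq : bucket q.1 P = [] := by
        rw [bucket, List.filter_eq_nil_iff.mpr, List.map_nil]
        intro x hx
        simp only [beq_iff_eq]
        intro he
        exact hq (by rw [kset, PySem.List.mem_dedup]; exact List.mem_map.mpr ⟨x, hx, he⟩)
      rw [hstep, PySem.Dict.modify, hget, hks, PySem.Set.add_of_not_mem hq,
        PySem.Dict.items_insert, if_neg (by simp [hcont]), ih, List.map_append]
      congr 1
      · refine List.map_congr_left fun p hp => ?_
        have hpq : q.1 ≠ p := fun h => hq (h ▸ hp)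
        simp [bucket_append_singleton, hpq]
      · simp [bucket_append_singleton, hbq]

theorem groupFold_keys (P : List (String × String)) : (groupFold P).keys = kset P := by
  simp [PySem.Dict.keys, groupFold_items, List.map_map, Function.comp_def]

theorem groupFold_getD (P : List (String × String)) {p : String} (hp : p ∈ kset P) :
    (groupFold P).getD p [] = bucket p P := by
  have hmem : (p, bucket p P) ∈ (groupFold P).items := by
    rw [groupFold_items]; exact List.mem_map_of_mem hp
  have := PySem.Dict.get?_of_mem_items _ hmem (groupFold_keys P ▸ PySem.List.nodup_dedup _)
  simp [PySem.Dict.getD, this]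

theorem dict_ext {κ ν : Type} (d e : PySem.Dict κ ν) (h : d.items = e.items) : d = e := by
  cases d; cases e; cases h; rfl

theorem bucket_sorted (p : String) (P : List (String × String)) :
    bucket p (PySem.List.sorted2 P Prod.fst Prod.snd) = PySem.List.sorted (bucket p P) (fun v => v) false := by
  have hperm : (bucket p (PySem.List.sorted2 P Prod.fst Prod.snd)).Perm (PySem.List.sorted (bucket p P) (fun v => v) false) := by
    refine List.Perm.trans ?_ (PySem.List.sorted_perm _ _ _).symm
    exact ((PySem.List.sorted2_perm P Prod.fst Prod.snd false).filter _).map _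
  refine PySem.List.eq_of_perm_of_pairwise_le hperm ?_ ?_
  · refine List.Pairwise.map (R := fun a b : String × String => a.2 ≤ b.2) _ (fun a b h => h) ?_
    · have h1 : (((PySem.List.sorted2 P Prod.fst Prod.snd).filter (fun q => q.1 == p))).Pairwise lexLe :=
        (sorted2_lex_pairwise P).sublist (List.filter_sublist)
      refine h1.imp_of_mem (fun {a b} ha hb hab => ?_)
      have hap : a.1 = p := by simpa using (List.mem_filter.mp ha).2
      have hbp : b.1 = p := by simpa using (List.mem_filter.mp hb).2
      rcases hab with h | ⟨_, h⟩
      · rw [hap, hbp] at h; exact absurd h (lt_irrefl p)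
      · exact h
  · simpa using PySem.List.sorted_pairwise (bucket p P) (fun v => v)

theorem kset_sorted (P : List (String × String)) :
    kset (PySem.List.sorted2 P Prod.fst Prod.snd) = PySem.List.sorted (kset P) (fun k => k) false := by
  have hn1 : (kset (PySem.List.sorted2 P Prod.fst Prod.snd)).Nodup := PySem.List.nodup_dedup _
  have hn2 : (PySem.List.sorted (kset P) (fun k => k) false).Nodup :=
    ((PySem.List.sorted_perm _ _ _).nodup_iff).mpr (PySem.List.nodup_dedup _)
  have hperm : (kset (PySem.List.sorted2 P Prod.fst Prod.snd)).Perm (PySem.List.sorted (kset P) (fun k => k) false) := by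
    refine (List.perm_ext_iff_of_nodup hn1 hn2).mpr (fun a => ?_)
    rw [kset, PySem.List.mem_dedup, PySem.List.mem_sorted, kset, PySem.List.mem_dedup]
    constructor
    · intro h; exact ((PySem.List.sorted2_perm P Prod.fst Prod.snd false).map Prod.fst).mem_iff.mp h
    · intro h; exact ((PySem.List.sorted2_perm P Prod.fst Prod.snd false).map Prod.fst).mem_iff.mpr h
  refine PySem.List.eq_of_perm_of_pairwise_le hperm ?_ ?_
  · refine List.Pairwise.sublist (dedup_sublist _) ?_
    exact List.Pairwise.map _ (fun a b h => (by rcases h with h | ⟨e, _⟩; exact le_of_lt h; exact le_of_eq e : a.1 ≤ b.1)) (sorted2_lex_pairwise P)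
  · simpa using PySem.List.sorted_pairwise (kset P) (fun k => k)

theorem dA_eq (passage : String) (sl : List (String × String)) :
    (sl.foldl (fun d q =>
      if d.contains passage then
        if (d.getD passage PySem.Dict.empty).contains q.1 then
          d.modify passage PySem.Dict.empty (fun inner => inner.modify q.1 [] (fun vs => vs ++ [q.2]))
        else
          d.modify passage PySem.Dict.empty (fun inner => inner.insert q.1 [q.2])
      else d.insert passage (PySem.Dict.empty.insert q.1 [q.2])) PySem.Dict.empty)
    = if sl = [] then PySem.Dict.empty else PySem.Dict.empty.insert passage (groupFold sl) := by
  induction sl using List.reverseRecOn with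
  | nil => simp
  | append_singleton sl q ih =>
    by_cases hnil : sl = []
    · subst hnil
      simp only [List.nil_append, List.foldl_cons, List.foldl_nil]
      rw [if_neg (by simp)]
      rw [if_neg (by simp : ¬([q] : List (String × String)) = [])]
      rfl
    · rw [List.foldl_append, ih, if_neg hnil, if_neg (by simp [hnil])]
      simp only [List.foldl_cons, List.foldl_nil]
      have hD : ((PySem.Dict.empty : PySem.Dict String (PySem.Dict String (List String))).insert passage (groupFold sl)).items = [(passage, groupFold sl)] := by
        simp [PySem.Dict.insert, PySem.Dict.contains, PySem.Dict.empty]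
      have hcont : ((PySem.Dict.empty : PySem.Dict String (PySem.Dict String (List String))).insert passage (groupFold sl)).contains passage = true := by
        simp [PySem.Dict.contains, hD]
      have hgetD : ((PySem.Dict.empty : PySem.Dict String (PySem.Dict String (List String))).insert passage (groupFold sl)).getD passage PySem.Dict.empty = groupFold sl := by
        simp [PySem.Dict.getD, PySem.Dict.get?, hD]
      rw [hcont]
      have hGstep : groupFold (sl ++ [q]) = (groupFold sl).modify q.1 [] (fun vs => vs ++ [q.2]) := by
        simp [groupFold, List.foldl_append]
      have hmod : ∀ f : PySem.Dict String (List String) → PySem.Dict String (List String),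
          ((PySem.Dict.empty : PySem.Dict String (PySem.Dict String (List String))).insert passage (groupFold sl)).modify passage PySem.Dict.empty f
          = (PySem.Dict.empty : PySem.Dict String (PySem.Dict String (List String))).insert passage (f (groupFold sl)) := by
        intro f
        rw [PySem.Dict.modify, hgetD]
        apply dict_ext
        rw [PySem.Dict.items_insert, if_pos hcont, hD]
        simp [PySem.Dict.insert, PySem.Dict.contains, PySem.Dict.empty]
      rw [hgetD]
      by_cases hc : (groupFold sl).contains q.1 = true
      · rw [if_pos hc, hmod, hGstep]; simp
      · have hcf : (groupFold sl).contains q.1 = false := by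
          revert hc; cases (groupFold sl).contains q.1 <;> simp
        have hmi : (groupFold sl).modify q.1 [] (fun vs => vs ++ [q.2]) = (groupFold sl).insert q.1 [q.2] := by
          unfold PySem.Dict.modify
          rw [PySem.Dict.getD_of_not_contains _ _ hcf]
          simp
        rw [if_neg hc, hmod, hGstep, hmi]; simp

theorem kset_ne_nil {P : List (String × String)} (h : P ≠ []) : kset P ≠ [] := by
  cases P with
  | nil => exact absurd rfl h
  | cons p t =>
    intro hk
    have : p.1 ∈ kset (p :: t) := by
      rw [kset, PySem.List.mem_dedup]; exact List.mem_map_of_mem (List.mem_cons_self)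
    rw [hk] at this
    exact absurd this (List.not_mem_nil)

theorem entry_eq (passage : String) (vp : List (String × List (String × List String))) :
    poolEntryA passage vp = poolEntryB passage vp := by
  have hl : (vp.foldl (fun l rv =>
      rv.2.foldl (fun l pv =>
        pv.2.foldl (fun l variant => l ++ [(pv.1, variant)]) l) l) ([] : List (String × String))) = flatP vp := by
    simp only [PySem.List.foldl_append_singleton_eq_map, PySem.List.foldl_append_eq_flatMap]
    simp [flatP]
  have hg : (vp.foldl (fun g rv =>
      rv.2.foldl (fun g pv =>
        pv.2.foldl (fun g variant => g.modify pv.1 [] (fun vs => vs ++ [variant])) g) g)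
      (PySem.Dict.empty : PySem.Dict String (List String))) = groupFold (flatP vp) := by
    simp only [groupFold, flatP, List.foldl_flatMap, List.foldl_map]
  rw [poolEntryA, poolEntryB, hl, hg]
  rw [dA_eq]
  by_cases hP : flatP vp = []
  · rw [hP]
    rfl
  · have hls : ¬ PySem.List.sorted2 (flatP vp) Prod.fst Prod.snd = [] := by
      intro h
      have hp2 := PySem.List.sorted2_perm (flatP vp) Prod.fst Prod.snd false
      rw [h] at hp2
      exact hP hp2.nil_eq.symm
    have hGne : ¬ (groupFold (flatP vp)).items = [] := by
      rw [groupFold_items]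
      simp [List.map_eq_nil_iff, kset_ne_nil hP]
    rw [if_neg hls, if_neg hGne]
    have hD : ((PySem.Dict.empty : PySem.Dict String (PySem.Dict String (List String))).insert passage (groupFold (PySem.List.sorted2 (flatP vp) Prod.fst Prod.snd))).items = [(passage, groupFold (PySem.List.sorted2 (flatP vp) Prod.fst Prod.snd))] := by
      simp [PySem.Dict.insert, PySem.Dict.contains, PySem.Dict.empty]
    rw [hD]
    simp only [List.map_cons, List.map_nil]
    congr 1
    congr 1
    rw [groupFold_items, groupFold_keys, ← kset_sorted]
    refine List.map_congr_left fun pos hpos => ?_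
    have hposP : pos ∈ kset (flatP vp) := by
      rw [kset, PySem.List.mem_dedup] at hpos ⊢
      exact (((PySem.List.sorted2_perm (flatP vp) Prod.fst Prod.snd false).map Prod.fst).mem_iff).mp hpos
    rw [groupFold_getD _ hposP, ← bucket_sorted]

-- ===== VERDICT (by name: the statement is the Claim_ definition above) =====
theorem pool_spec : Claim_equal_pool := by
  intro dico _
  unfold Spec_pool pool pool_alt
  simp only [entry_eq]
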